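-- pv_equiv track=rewrite | github.com/JakubFicek/Mesh_Generator | DelaunayTriangulation.py | is_edge_shared
-- ===== SOURCE A (Python) =====
-- def is_edge_shared(edge, TR, current_triangle):
--     for triangle in TR:
--         if triangle == current_triangle:
--             continue
--         triangle_edges = [(triangle[0], triangle[1]), (triangle[1], triangle[2]), (triangle[2], triangle[0])]
--         for triangle_edge in triangle_edges:
--             if edge[0] in triangle_edge and edge[1] in triangle_edge:
--                 return True
--     return False
-- ===== SOURCE B (Python) =====
-- def is_edge_shared(edge, TR, current_triangle):
--     a, b = edge[0], edge[1]
--     return any(t != current_triangle and a in t and b in t for t in TR)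
-- ===== Notes on version B (the rewrite author's own statement) =====
-- stated objective: simpler
-- what changed: Replaced the per-triangle edge-list construction and nested edge loop with a single any() over triangles using direct vertex-membership (both endpoints in the triangle), which is equivalent since every pair of vertices of a 3-tuple triangle forms one of its three edges.
import Mathlib
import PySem

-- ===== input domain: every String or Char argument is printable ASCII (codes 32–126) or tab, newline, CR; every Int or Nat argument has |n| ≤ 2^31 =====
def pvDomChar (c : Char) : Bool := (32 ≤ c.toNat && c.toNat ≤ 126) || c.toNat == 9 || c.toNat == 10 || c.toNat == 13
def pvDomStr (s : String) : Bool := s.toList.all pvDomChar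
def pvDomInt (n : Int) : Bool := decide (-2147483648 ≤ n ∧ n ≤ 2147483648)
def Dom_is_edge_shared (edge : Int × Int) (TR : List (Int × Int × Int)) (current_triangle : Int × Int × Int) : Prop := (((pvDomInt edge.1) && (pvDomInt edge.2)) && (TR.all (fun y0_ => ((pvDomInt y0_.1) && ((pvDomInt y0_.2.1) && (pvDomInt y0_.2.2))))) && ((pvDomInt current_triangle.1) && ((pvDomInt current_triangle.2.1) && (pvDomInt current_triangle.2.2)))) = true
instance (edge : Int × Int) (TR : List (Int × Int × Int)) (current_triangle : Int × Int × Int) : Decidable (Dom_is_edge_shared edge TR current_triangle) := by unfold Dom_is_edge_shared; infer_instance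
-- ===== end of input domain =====

-- ===== PORT A =====
-- B changes: inner edge enumeration replaced by a direct both-endpoints-in-triangle membership test (simpler; same O(T) scan).
def is_edge_shared (edge : Int × Int) (TR : List (Int × Int × Int)) (current_triangle : Int × Int × Int) : Bool :=
  match TR with
  | [] => false
  | triangle :: rest =>
    if triangle == current_triangle then
      is_edge_shared edge rest current_triangle
    else
      let triangle_edges := [(triangle.1, triangle.2.1), (triangle.2.1, triangle.2.2), (triangle.2.2, triangle.1)]
      if triangle_edges.any (fun te => (edge.1 == te.1 || edge.1 == te.2) && (edge.2 == te.1 || edge.2 == te.2)) then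
        true
      else
        is_edge_shared edge rest current_triangle

-- ===== PORT B =====
def memTri (v : Int) (t : Int × Int × Int) : Bool :=
  v == t.1 || v == t.2.1 || v == t.2.2

def is_edge_shared_alt (edge : Int × Int) (TR : List (Int × Int × Int)) (current_triangle : Int × Int × Int) : Bool :=
  TR.any (fun t => t != current_triangle && memTri edge.1 t && memTri edge.2 t)

-- ===== PRECONDITION & SPEC =====
def Spec_is_edge_shared (edge : Int × Int) (TR : List (Int × Int × Int)) (current_triangle : Int × Int × Int) (out : Bool) : Prop := out = is_edge_shared_alt edge TR current_triangle
instance (edge : Int × Int) (TR : List (Int × Int × Int)) (current_triangle : Int × Int × Int) (out : Bool) : Decidable (Spec_is_edge_shared edge TR current_triangle out) := by unfold Spec_is_edge_shared; infer_instance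

-- ===== CLAIM (what is proved, stated in full; the proofs are below) =====
def Claim_equal_is_edge_shared : Prop := ∀ (edge : Int × Int) (TR : List (Int × Int × Int)) (current_triangle : Int × Int × Int), Dom_is_edge_shared edge TR current_triangle → Spec_is_edge_shared edge TR current_triangle (is_edge_shared edge TR current_triangle)

-- ===== LEMMAS AND PROOFS =====

-- ===== VERDICT (by name: the statement is the Claim_ definition above) =====
-- Per-triangle equivalence: both endpoints lie on a common edge of a 3-tuple iff both are vertices.
lemma tri_step (edge : Int × Int) (t : Int × Int × Int) :
    ([(t.1, t.2.1), (t.2.1, t.2.2), (t.2.2, t.1)].any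
      (fun te => (edge.1 == te.1 || edge.1 == te.2) && (edge.2 == te.1 || edge.2 == te.2)))
    = (memTri edge.1 t && memTri edge.2 t) := by
  simp only [List.any_cons, List.any_nil, memTri, Bool.or_false]
  generalize (edge.1 == t.1) = a1
  generalize (edge.1 == t.2.1) = a2
  generalize (edge.1 == t.2.2) = a3
  generalize (edge.2 == t.1) = b1
  generalize (edge.2 == t.2.1) = b2
  generalize (edge.2 == t.2.2) = b3
  cases a1 <;> cases a2 <;> cases a3 <;> cases b1 <;> cases b2 <;> cases b3 <;> rfl

lemma A_cons (edge : Int × Int) (t : Int × Int × Int) (rest : List (Int × Int × Int)) (ct : Int × Int × Int) :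
    is_edge_shared edge (t :: rest) ct
    = ((!(t == ct)) && ([(t.1, t.2.1), (t.2.1, t.2.2), (t.2.2, t.1)].any
        (fun te => (edge.1 == te.1 || edge.1 == te.2) && (edge.2 == te.1 || edge.2 == te.2)))
       || is_edge_shared edge rest ct) := by
  cases h1 : (t == ct) <;>
    cases h2 : ([(t.1, t.2.1), (t.2.1, t.2.2), (t.2.2, t.1)].any
        (fun te => (edge.1 == te.1 || edge.1 == te.2) && (edge.2 == te.1 || edge.2 == te.2))) <;>
    simp [is_edge_shared, h1, h2]

lemma core (edge : Int × Int) (TR : List (Int × Int × Int)) (ct : Int × Int × Int) :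
    is_edge_shared edge TR ct = is_edge_shared_alt edge TR ct := by
  induction TR with
  | nil => rfl
  | cons t rest ih =>
    rw [A_cons, tri_step, ih]
    simp [is_edge_shared_alt, List.any_cons, bne, Bool.and_assoc]

theorem is_edge_shared_spec : Claim_equal_is_edge_shared := by
  intro edge TR ct _
  unfold Spec_is_edge_shared
  exact core edge TR ct
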